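-- pv_equiv track=rewrite | github.com/nazhanHarzula/test-case-problem | test_case1.py | split_data_into_part
-- ===== SOURCE A (Python) =====
-- def split_data_into_part(list_order):
--     list_new = []
--     my_list = []
--
--     for i in range(len(list_order)):
--         if i+1 < len(list_order):
--             if list_order[i] < list_order[i+1]:
--                 my_list.append(list_order[i])
--             else:
--                 my_list.append(list_order[i])
--                 list_new.append(my_list)
--                 my_list = []
--
--     return list_new
-- ===== SOURCE B (Python) =====
-- def split_data_into_part(list_order):
--     n = len(list_order)
--     boundaries = [b for b in range(n - 1) if not list_order[b] < list_order[b + 1]]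
--     parts = []
--     start = 0
--     for b in boundaries:
--         parts.append(list_order[start:b + 1])
--         start = b + 1
--     return parts
-- ===== Notes on version B (the rewrite author's own statement) =====
-- stated objective: alternative
-- what changed: B first computes the list of run-boundary indices (where the ascent stops), then slices the input between consecutive boundaries, instead of A's single element-by-element loop that accumulates a current run; A's drop of the final element and of any trailing partial run falls out of the boundary/slice formulation automatically.
import Mathlib
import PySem

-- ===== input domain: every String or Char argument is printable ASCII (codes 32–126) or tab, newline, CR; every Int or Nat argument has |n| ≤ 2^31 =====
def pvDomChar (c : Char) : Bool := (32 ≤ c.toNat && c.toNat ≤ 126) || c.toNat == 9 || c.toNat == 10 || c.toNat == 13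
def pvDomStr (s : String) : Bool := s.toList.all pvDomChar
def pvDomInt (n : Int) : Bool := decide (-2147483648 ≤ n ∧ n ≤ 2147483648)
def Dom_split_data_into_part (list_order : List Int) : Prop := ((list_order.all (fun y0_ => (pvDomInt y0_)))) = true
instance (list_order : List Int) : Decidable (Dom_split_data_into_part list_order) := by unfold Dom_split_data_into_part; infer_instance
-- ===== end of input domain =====

-- B replaces A's element-by-element run accumulator with a two-pass boundary-index-then-slice
-- decomposition (objective: alternative; same O(n) cost).

-- ===== PORT A =====
-- loop body of A's for-loop (state = (list_new, my_list))
def aStep (xs : List Int) (st : List (List Int) × List Int) (i : Int) :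
    List (List Int) × List Int :=
  if i + 1 < PySem.List.len xs then
    if PySem.List.pyGetD xs i 0 < PySem.List.pyGetD xs (i + 1) 0 then
      (st.1, st.2 ++ [PySem.List.pyGetD xs i 0])
    else
      (st.1 ++ [st.2 ++ [PySem.List.pyGetD xs i 0]], [])
  else st

def split_data_into_part (list_order : List Int) : List (List Int) :=
  ((PySem.List.pyRange 0 (PySem.List.len list_order)).foldl (aStep list_order) ([], [])).1

-- ===== PORT B =====
-- the comprehension's condition: `not list_order[b] < list_order[b+1]`
def bIsBoundary (xs : List Int) (b : Int) : Bool :=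
  ! decide (PySem.List.pyGetD xs b 0 < PySem.List.pyGetD xs (b + 1) 0)

-- loop body of B's for-loop (state = (parts, start))
def bStep (xs : List Int) (st : List (List Int) × Int) (b : Int) :
    List (List Int) × Int :=
  (st.1 ++ [PySem.List.slice xs (some st.2) (some (b + 1))], b + 1)

def split_data_into_part_alt (list_order : List Int) : List (List Int) :=
  (((PySem.List.pyRange 0 (PySem.List.len list_order - 1)).filter
      (bIsBoundary list_order)).foldl (bStep list_order) ([], 0)).1

-- ===== PRECONDITION & SPEC =====
def Spec_split_data_into_part (list_order : List Int) (out : List (List Int)) : Prop := out = split_data_into_part_alt list_order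
instance (list_order : List Int) (out : List (List Int)) : Decidable (Spec_split_data_into_part list_order out) := by unfold Spec_split_data_into_part; infer_instance

-- ===== CLAIM (what is proved, stated in full; the proofs are below) =====
def Claim_equal_split_data_into_part : Prop := ∀ (list_order : List Int), Dom_split_data_into_part list_order → Spec_split_data_into_part list_order (split_data_into_part list_order)

-- ===== LEMMAS AND PROOFS =====

lemma slice_self_nil (xs : List Int) (i : Int) (hi : 0 ≤ i) :
    PySem.List.slice xs (some i) (some i) = [] := by
  rw [PySem.List.slice_toNat xs hi hi]
  simp

lemma slice_snoc (xs : List Int) (s i : Int) (hs : 0 ≤ s) (hsi : s ≤ i)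
    (hi : i < (xs.length : Int)) :
    PySem.List.slice xs (some s) (some i) ++ [PySem.List.pyGetD xs i 0]
      = PySem.List.slice xs (some s) (some (i + 1)) := by
  have h0i : 0 ≤ i := le_trans hs hsi
  rw [PySem.List.slice_toNat xs hs h0i, PySem.List.slice_toNat xs hs (by omega),
    PySem.List.pyGetD_eq_getElem xs 0 h0i hi]
  have hlen : i.toNat < xs.length := by omega
  have h1 : (i + 1).toNat - s.toNat = (i.toNat - s.toNat) + 1 := by omega
  rw [h1, List.take_succ]
  have h2 : (List.drop s.toNat xs)[i.toNat - s.toNat]? = some xs[i.toNat] := by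
    rw [List.getElem?_drop]
    have h3 : s.toNat + (i.toNat - s.toNat) = i.toNat := by omega
    rw [h3, List.getElem?_eq_getElem hlen]
  rw [h2]
  rfl

-- the common loop invariant: A's fold from index i with current run xs[s:i]
-- produces the same first component as B's fold over the boundaries ≥ i with start = s
lemma seg_loop (xs : List Int) (k : Nat) :
    ∀ (i s : Int) (acc : List (List Int)), 0 ≤ s → s ≤ i →
      (((xs.length : Int) - 1) - i).toNat = k →
      ((PySem.List.pyRange i ((xs.length : Int) - 1)).foldl (aStep xs)
          (acc, PySem.List.slice xs (some s) (some i))).1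
        = (((PySem.List.pyRange i ((xs.length : Int) - 1)).filter
            (bIsBoundary xs)).foldl (bStep xs) (acc, s)).1 := by
  induction k with
  | zero =>
    intro i s acc hs hsi hk
    have hmi : (xs.length : Int) - 1 ≤ i := by omega
    rw [PySem.List.pyRange_one_eq_nil hmi]
    simp
  | succ k ih =>
    intro i s acc hs hsi hk
    have him : i < (xs.length : Int) - 1 := by omega
    rw [PySem.List.pyRange_one_cons him]
    simp only [List.foldl_cons, List.filter_cons]
    have hguard : i + 1 < PySem.List.len xs := by
      rw [PySem.List.len_eq]; omega
    by_cases h : PySem.List.pyGetD xs i 0 < PySem.List.pyGetD xs (i + 1) 0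
    · have ha : aStep xs (acc, PySem.List.slice xs (some s) (some i)) i
          = (acc, PySem.List.slice xs (some s) (some (i + 1))) := by
        unfold aStep
        rw [if_pos hguard, if_pos h]
        simp only [Prod.mk.injEq, true_and]
        exact slice_snoc xs s i hs hsi (by omega)
      have hb : bIsBoundary xs i = false := by
        unfold bIsBoundary; simp [h]
      rw [ha, hb]
      simp only [Bool.false_eq_true, if_false]
      exact ih (i + 1) s acc hs (by omega) (by omega)
    · have ha : aStep xs (acc, PySem.List.slice xs (some s) (some i)) i
          = (acc ++ [PySem.List.slice xs (some s) (some (i + 1))],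
             PySem.List.slice xs (some (i + 1)) (some (i + 1))) := by
        unfold aStep
        rw [if_pos hguard, if_neg h]
        rw [slice_snoc xs s i hs hsi (by omega), slice_self_nil xs (i + 1) (by omega)]
      have hb : bIsBoundary xs i = true := by
        unfold bIsBoundary; simp [h]
      rw [ha, hb]
      simp only [if_true]
      have hbs : bStep xs (acc, s) i
          = (acc ++ [PySem.List.slice xs (some s) (some (i + 1))], i + 1) := rfl
      rw [List.foldl_cons, hbs]
      exact ih (i + 1) (i + 1) (acc ++ [PySem.List.slice xs (some s) (some (i + 1))])
        (by omega) (le_refl _) (by omega)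

-- ===== VERDICT (by name: the statement is the Claim_ definition above) =====
theorem split_data_into_part_spec : Claim_equal_split_data_into_part := by
  intro xs _
  unfold Spec_split_data_into_part split_data_into_part split_data_into_part_alt
  rw [PySem.List.len_eq]
  rcases Nat.eq_zero_or_pos xs.length with h0 | hpos
  · have hx : xs = [] := List.eq_nil_of_length_eq_zero h0
    subst hx
    rfl
  · have h1 : (1 : Int) ≤ (xs.length : Int) := by exact_mod_cast hpos
    have hsplit := PySem.List.pyRange_one_append 0 ((xs.length : Int) - 1)
      (xs.length : Int) (by omega) (by omega)
    rw [hsplit, List.foldl_append]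
    have hlast : PySem.List.pyRange ((xs.length : Int) - 1) (xs.length : Int)
        = [(xs.length : Int) - 1] := by
      rw [PySem.List.pyRange_one_cons (by omega), PySem.List.pyRange_one_eq_nil (by omega)]
    rw [hlast]
    simp only [List.foldl_cons, List.foldl_nil]
    have hstep : ∀ st : List (List Int) × List Int,
        aStep xs st ((xs.length : Int) - 1) = st := by
      intro st
      unfold aStep
      rw [if_neg (by rw [PySem.List.len_eq]; omega)]
    rw [hstep]
    have := seg_loop xs ((xs.length : Int) - 1).toNat 0 0 [] (le_refl 0) (le_refl 0)
      (by omega)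
    rw [slice_self_nil xs 0 (le_refl 0)] at this
    exact this
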